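-- pv_equiv track=rewrite | github.com/JH-TT/Coding_Practice | Programmers/Hash_P/42576.py | solution
-- ===== SOURCE A (Python) =====
-- from collections import defaultdict
--
-- def solution(participant, completion):
--     cnt = defaultdict(int)
--     for p in participant:
--         cnt[p] += 1
--     for c in completion:
--         cnt[c] -= 1
--     for c in cnt:
--         if cnt[c] != 0:
--             return c
-- ===== SOURCE B (Python) =====
-- def solution(participant, completion):
--     seen = set()
--     for name in participant + completion:
--         if name not in seen:
--             seen.add(name)
--             if participant.count(name) != completion.count(name):
--                 return name
-- ===== Notes on version B (the rewrite author's own statement) =====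
-- stated objective: alternative
-- what changed: Replaces the defaultdict increment/decrement counting and dict-key scan by a duplicate-skipping scan over participant+completion that compares participant.count(name) with completion.count(name) directly, with no dictionary of counts.
-- outside the precondition, e.g. on solution(['a'], ['a']): A returns None, B returns None
import Mathlib
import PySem

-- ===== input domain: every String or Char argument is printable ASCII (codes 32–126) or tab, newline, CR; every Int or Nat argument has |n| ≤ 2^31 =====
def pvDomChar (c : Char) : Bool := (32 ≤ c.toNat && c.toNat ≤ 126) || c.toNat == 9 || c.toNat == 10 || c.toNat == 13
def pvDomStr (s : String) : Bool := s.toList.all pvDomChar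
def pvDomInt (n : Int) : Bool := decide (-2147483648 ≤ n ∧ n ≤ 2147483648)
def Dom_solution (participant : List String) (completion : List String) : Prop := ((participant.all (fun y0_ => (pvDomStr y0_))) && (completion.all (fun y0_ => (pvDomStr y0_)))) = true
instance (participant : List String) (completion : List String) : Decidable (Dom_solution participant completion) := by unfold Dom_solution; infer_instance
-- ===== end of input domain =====

-- B replaces A's defaultdict counting with a duplicate-skipping scan of participant + completion
-- that compares list.count on the two lists directly (alternative decomposition, no dict).

-- ===== PORT A =====
def solution (participant : List String) (completion : List String) : String :=
  let cnt : PySem.Dict String Int :=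
    participant.foldl (fun d p => d.modify p 0 (fun x => x + 1)) PySem.Dict.empty
  let cnt := completion.foldl (fun d c => d.modify c 0 (fun x => x - 1)) cnt
  -- 'for c in cnt: if cnt[c] != 0: return c'; the fall-off-the-end None lies outside Pre_, ported as ""
  ((cnt.keys.find? (fun c => cnt.getD c 0 != 0)).getD "")

-- ===== PORT B =====
def solutionAltGo (participant : List String) (completion : List String) :
    List String → PySem.Set String → Option String
  | [], _ => none
  | name :: rest, seen =>
    if seen.contains name then solutionAltGo participant completion rest seen
    else
      let seen' := seen.add name
      if PySem.List.count participant name != PySem.List.count completion name then some name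
      else solutionAltGo participant completion rest seen'

def solution_alt (participant : List String) (completion : List String) : String :=
  ((solutionAltGo participant completion (participant ++ completion) PySem.Set.empty).getD "")

-- ===== PRECONDITION & SPEC =====
-- Pre_ excludes exactly the inputs on which every name occurs equally often in both lists: there
-- Python A falls off the end and returns None, which is not a String value (B does the same).
def Pre_solution (participant : List String) (completion : List String) : Prop :=
  ∃ x ∈ participant ++ completion, List.count x participant ≠ List.count x completion
instance (participant : List String) (completion : List String) : Decidable (Pre_solution participant completion) := by unfold Pre_solution; infer_instance
def pvWitness_solution : List String × List String := (["a", "b"], ["a"])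

def Spec_solution (participant : List String) (completion : List String) (out : String) : Prop := out = solution_alt participant completion
instance (participant : List String) (completion : List String) (out : String) : Decidable (Spec_solution participant completion out) := by unfold Spec_solution; infer_instance

-- ===== CLAIM (what is proved, stated in full; the proofs are below) =====
def Claim_equal_solution : Prop := ∀ (participant : List String) (completion : List String), Dom_solution participant completion → Pre_solution participant completion → Spec_solution participant completion (solution participant completion)

-- ===== LEMMAS AND PROOFS =====

theorem pv_keys_modify {κ ν : Type} [BEq κ] [LawfulBEq κ] (d : PySem.Dict κ ν) (k : κ) (dflt : ν)
    (f : ν → ν) : (d.modify k dflt f).keys = PySem.Set.add d.keys k := by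
  have hck : PySem.Set.contains d.keys k = d.contains k := by
    simp only [PySem.Set.contains, PySem.Dict.contains, PySem.Dict.keys]
    rw [Bool.eq_iff_iff]
    simp only [List.elem_iff, List.any_eq_true, List.mem_map, beq_iff_eq]
  by_cases h : d.contains k
  · rw [PySem.Set.add, hck, if_pos h]
    simp only [PySem.Dict.modify, PySem.Dict.insert, h, if_true, PySem.Dict.keys, List.map_map]
    apply List.map_congr_left
    intro p _
    by_cases hpk : p.1 == k
    · simp [eq_of_beq hpk]
    · simp [hpk]
  · rw [PySem.Set.add, hck, if_neg h]
    simp [PySem.Dict.modify, PySem.Dict.insert, h, PySem.Dict.keys]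

theorem pv_keys_foldl_modify {κ ν : Type} [BEq κ] [LawfulBEq κ] (dflt : ν) (f : κ → ν → ν) :
    ∀ (l : List κ) (d : PySem.Dict κ ν),
      (l.foldl (fun d x => d.modify x dflt (f x)) d).keys = l.foldl PySem.Set.add d.keys
  | [], d => rfl
  | x :: l, d => by
    simp only [List.foldl_cons]
    rw [pv_keys_foldl_modify dflt f l, pv_keys_modify]

theorem pv_getD_foldl_modify_sub_one {κ : Type} [BEq κ] [LawfulBEq κ] :
    ∀ (l : List κ) (d : PySem.Dict κ Int) (v : κ),
      (l.foldl (fun d x => d.modify x 0 (fun y => y - 1)) d).getD v 0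
        = d.getD v 0 - (l.count v : Int)
  | [], d, v => by simp
  | x :: l, d, v => by
    simp only [List.foldl_cons]
    rw [pv_getD_foldl_modify_sub_one l]
    by_cases hvx : v = x
    · subst hvx
      rw [PySem.Dict.getD_modify_self, List.count_cons_self]
      push_cast; ring
    · have hxv : ¬ x = v := fun h => hvx h.symm
      rw [PySem.Dict.getD_modify_of_ne _ _ _ hvx]; simp [hxv]

theorem pv_find?_foldl_add {α : Type} [BEq α] [LawfulBEq α] (p : α → Bool) :
    ∀ (l : List α) (s : PySem.Set α),
      (l.foldl PySem.Set.add s).find? p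
        = (s.find? p).or (l.find? (fun x => p x && !s.contains x))
  | [], s => by simp
  | x :: l, s => by
    simp only [List.foldl_cons]
    rw [pv_find?_foldl_add p l]
    by_cases hx : s.contains x
    · have hadd : s.add x = s := by rw [PySem.Set.add, if_pos hx]
      have hx' : x ∈ s := List.mem_of_elem_eq_true hx
      have hq : ¬ ((fun y => p y && !s.contains y) x = true) := by simp [hx']
      rw [hadd, List.find?_cons_of_neg (p := fun y => p y && !s.contains y) hq]
    · have hadd : s.add x = s ++ [x] := by rw [PySem.Set.add, if_neg hx]
      have hxb : s.contains x = false := by rwa [Bool.not_eq_true] at hx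
      have hcadd : ∀ y, (s ++ [x]).contains y = (y == x || s.contains y) := by
        intro y
        rw [Bool.eq_iff_iff]
        simp [List.mem_append]
        tauto
      rw [hadd, List.find?_append]
      by_cases hpx : p x
      · have hxn : x ∉ s := fun hm => hx (List.contains_iff_mem.mpr hm)
        have hq : ((fun y => p y && !s.contains y) x = true) := by simp [hpx, hxn]
        rw [List.find?_cons_of_pos (p := fun y => p y && !s.contains y) hq,
          List.find?_cons_of_pos hpx, Option.or_assoc, Option.some_or]
      · have hpxb : p x = false := by rwa [Bool.not_eq_true] at hpx
        have hq : ¬ ((fun y => p y && !s.contains y) x = true) := by simp [hpxb]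
        have hpred : (fun y => p y && !(s ++ [x]).contains y) = (fun y => p y && !s.contains y) := by
          funext y
          rw [hcadd y]
          by_cases hyx : y == x
          · rw [eq_of_beq hyx, hpxb]; simp
          · simp only [Bool.not_eq_true] at hyx
            rw [hyx]; simp
        rw [List.find?_cons_of_neg (p := fun y => p y && !s.contains y) hq,
          List.find?_cons_of_neg hpx, List.find?_nil,
          hpred, Option.or_none]

theorem pv_go_eq_find? (participant completion : List String) :
    ∀ (l : List String) (seen : PySem.Set String),
      (∀ x ∈ seen, (PySem.List.count participant x != PySem.List.count completion x) = false) →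
      solutionAltGo participant completion l seen
        = l.find? (fun x => PySem.List.count participant x != PySem.List.count completion x)
  | [], seen, _ => rfl
  | name :: rest, seen, hinv => by
    rw [solutionAltGo]
    by_cases hc : seen.contains name
    · have hmem : name ∈ seen := List.contains_iff_mem.mp hc
      rw [if_pos hc, pv_go_eq_find? participant completion rest seen hinv,
        List.find?_cons_of_neg (p := fun x => PySem.List.count participant x != PySem.List.count completion x) (by simpa using hinv name hmem)]
    · rw [if_neg hc]
      by_cases hp : PySem.List.count participant name != PySem.List.count completion name
      · rw [if_pos hp, List.find?_cons_of_pos (p := fun x => PySem.List.count participant x != PySem.List.count completion x) hp]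
      · have hinv' : ∀ x ∈ seen.add name,
            (PySem.List.count participant x != PySem.List.count completion x) = false := by
          intro x hx
          rcases (PySem.Set.mem_add seen name x).mp hx with h | h
          · exact hinv x h
          · subst h; rwa [Bool.not_eq_true] at hp
        rw [if_neg hp, pv_go_eq_find? participant completion rest (seen.add name) hinv',
          List.find?_cons_of_neg (p := fun x => PySem.List.count participant x != PySem.List.count completion x) hp]

theorem pv_main (participant completion : List String) :
    solution participant completion = solution_alt participant completion := by
  rw [solution, solution_alt,
    pv_go_eq_find? participant completion _ PySem.Set.empty (by intro x hx; cases hx)]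
  have hkeys :
      (completion.foldl (fun d c => d.modify c 0 (fun x => x - 1))
        (participant.foldl (fun d p => d.modify p 0 (fun x => x + 1)) (PySem.Dict.empty : PySem.Dict String Int))).keys
      = PySem.Set.ofList (participant ++ completion) := by
    rw [pv_keys_foldl_modify 0 (fun _ x => x - 1),
      pv_keys_foldl_modify 0 (fun _ x => x + 1)]
    simp [PySem.Set.ofList, List.foldl_append, PySem.Dict.keys, PySem.Dict.empty]
  have hval : ∀ v,
      (completion.foldl (fun d c => d.modify c 0 (fun x => x - 1))
        (participant.foldl (fun d p => d.modify p 0 (fun x => x + 1)) (PySem.Dict.empty : PySem.Dict String Int))).getD v 0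
      = (participant.count v : Int) - (completion.count v : Int) := by
    intro v
    rw [pv_getD_foldl_modify_sub_one, PySem.Dict.getD_foldl_modify_add_one]
    simp [PySem.Dict.getD, PySem.Dict.get?, PySem.Dict.empty]
  have hpred :
      (fun c => (completion.foldl (fun d c => d.modify c 0 (fun x => x - 1))
        (participant.foldl (fun d p => d.modify p 0 (fun x => x + 1)) (PySem.Dict.empty : PySem.Dict String Int))).getD c 0 != 0)
      = (fun x => PySem.List.count participant x != PySem.List.count completion x) := by
    funext x
    simp only [hval x]
    rw [Bool.eq_iff_iff]
    simp [bne_iff_ne, sub_eq_zero, PySem.List.count]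
  simp only [hkeys, hpred]
  rw [PySem.Set.ofList, pv_find?_foldl_add _ (participant ++ completion) PySem.Set.empty]
  simp [PySem.Set.empty, PySem.Set.contains]

-- ===== VERDICT (by name: the statement is the Claim_ definition above) =====
theorem solution_spec : Claim_equal_solution := by
  intro participant completion _ _
  show solution participant completion = solution_alt participant completion
  exact pv_main participant completion
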